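-- pv_equiv track=rewrite | github.com/MathieuMRoy/Stock-Valuation | fetchers/news.py | _sort_and_trim
-- ===== SOURCE A (Python) =====
-- def _sort_and_trim(items: list[dict], limit: int) -> list[dict]:
--     deduped: dict[tuple[str, str], dict] = {}
--     for item in items:
--         if not item:
--             continue
--         key = ((item.get("title") or "").lower(), item.get("link") or "")
--         existing = deduped.get(key)
--         if existing is None or (item.get("sort_key") or "") > (existing.get("sort_key") or ""):
--             deduped[key] = item
--
--     ordered = sorted(
--         deduped.values(),
--         key=lambda item: ((item.get("sort_key") or ""), (item.get("title") or "")),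
--         reverse=True,
--     )
--
--     trimmed = []
--     for item in ordered[:limit]:
--         clean_item = dict(item)
--         clean_item.pop("sort_key", None)
--         trimmed.append(clean_item)
--     return trimmed
-- ===== SOURCE B (Python) =====
-- def _group_key(item):
--     return ((item.get("title") or "").lower(), item.get("link") or "")
--
--
-- def _strip(item):
--     clean = dict(item)
--     clean.pop("sort_key", None)
--     return clean
--
--
-- def _sort_and_trim(items, limit):
--     rest = [item for item in items if item]
--     survivors = []
--     while rest:
--         head, tail = rest[0], rest[1:]
--         gkey = _group_key(head)
--         best = head
--         for item in tail:
--             if _group_key(item) == gkey and (item.get("sort_key") or "") > (best.get("sort_key") or ""):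
--                 best = item
--         survivors.append(best)
--         rest = [item for item in tail if _group_key(item) != gkey]
--     ordered = sorted(
--         survivors,
--         key=lambda item: ((item.get("sort_key") or ""), (item.get("title") or "")),
--         reverse=True,
--     )
--     return [_strip(item) for item in ordered[:limit]]
-- ===== Notes on version B (the rewrite author's own statement) =====
-- stated objective: alternative
-- what changed: A dedupes with a dict keyed by (lowered title, link) doing an in-place max-reduce; B dedupes with a dictionary-free group-extraction pass (scan for the best item of the first item's group, filter that group out, repeat), then sorts and trims the same way.
import Mathlib
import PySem

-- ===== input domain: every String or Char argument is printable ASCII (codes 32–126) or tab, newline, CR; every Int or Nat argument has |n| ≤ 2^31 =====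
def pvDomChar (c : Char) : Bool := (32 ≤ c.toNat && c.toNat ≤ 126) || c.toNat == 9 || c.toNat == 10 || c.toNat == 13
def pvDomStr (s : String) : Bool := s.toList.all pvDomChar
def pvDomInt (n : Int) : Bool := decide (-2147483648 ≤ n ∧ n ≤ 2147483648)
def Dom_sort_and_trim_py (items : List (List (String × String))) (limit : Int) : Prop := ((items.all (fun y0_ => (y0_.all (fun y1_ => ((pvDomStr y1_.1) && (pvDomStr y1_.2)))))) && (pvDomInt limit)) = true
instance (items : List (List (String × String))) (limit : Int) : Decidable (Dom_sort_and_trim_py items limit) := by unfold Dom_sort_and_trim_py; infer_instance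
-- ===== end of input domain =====

-- B replaces A's dict-keyed max-reduce dedup by a dictionary-free group-extraction pass
-- (take the first item's key, scan for the best of that group, drop the group, repeat);
-- objective: alternative (same observable behaviour, no dict).

-- ===== PORT A =====
-- (item.get(k) or "") — values are strings, so falsy value = "", the default
def pvGet (item : List (String × String)) (k : String) : String :=
  PySem.Dict.getD (PySem.Dict.mk item) k ""

-- ((item.get("title") or "").lower(), item.get("link") or "")
def pvKey (item : List (String × String)) : String × String :=
  (PySem.Str.lower (pvGet item "title"), pvGet item "link")

-- (item.get("sort_key") or "")
def pvSk (item : List (String × String)) : String := pvGet item "sort_key"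

-- Python's sort key is the tuple ((sort_key or ''), (title or '')); encoded here as the
-- NUL-joined string (exact: tuple lex order = string lex order since NUL is below every
-- character that can occur in the components).
def pvOrdKey (item : List (String × String)) : String :=
  pvSk item ++ "\x00" ++ pvGet item "title"

-- clean_item = dict(item); clean_item.pop("sort_key", None)
def pvStrip (item : List (String × String)) : List (String × String) :=
  (PySem.Dict.erase (PySem.Dict.mk item) "sort_key").items

-- the body of A's dedup loop
def aStep (d : PySem.Dict (String × String) (List (String × String)))
    (item : List (String × String)) : PySem.Dict (String × String) (List (String × String)) :=
  if item.isEmpty then d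
  else
    let key := pvKey item
    match d.get? key with
    | none => d.insert key item
    | some existing => if pvSk existing < pvSk item then d.insert key item else d

def sort_and_trim_py (items : List (List (String × String))) (limit : Int) :
    List (List (String × String)) :=
  let deduped := items.foldl aStep ⟨[]⟩
  let ordered := PySem.List.sorted deduped.values pvOrdKey true
  (PySem.List.slice ordered none (some limit)).foldl (fun acc item => acc ++ [pvStrip item]) []

-- ===== PORT B =====
-- the body of B's best-of-the-group scan
def pvBest (gkey : String × String) (best item : List (String × String)) :
    List (String × String) :=
  if pvKey item = gkey ∧ pvSk best < pvSk item then item else best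

-- group extraction: best of the first item's group, then recurse on the other groups
def pvDedup : List (List (String × String)) → List (List (String × String))
  | [] => []
  | head :: tail =>
      (tail.foldl (pvBest (pvKey head)) head) ::
        pvDedup (tail.filter (fun item => !(pvKey item == pvKey head)))
termination_by l => l.length
decreasing_by
  refine Nat.lt_succ_of_le ?_
  calc (List.filter _ tail.attach).unattach.length
      = (List.filter _ tail.attach).length := List.length_unattach ..
    _ ≤ tail.attach.length := List.length_filter_le _ _
    _ = tail.length := List.length_attach ..

def sort_and_trim_py_alt (items : List (List (String × String))) (limit : Int) :
    List (List (String × String)) :=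
  let survivors := pvDedup (items.filter (fun item => !item.isEmpty))
  let ordered := PySem.List.sorted survivors pvOrdKey true
  (PySem.List.slice ordered none (some limit)).map pvStrip

-- ===== PRECONDITION & SPEC =====
def Spec_sort_and_trim_py (items : List (List (String × String))) (limit : Int) (out : List (List (String × String))) : Prop := out = sort_and_trim_py_alt items limit
instance (items : List (List (String × String))) (limit : Int) (out : List (List (String × String))) : Decidable (Spec_sort_and_trim_py items limit out) := by unfold Spec_sort_and_trim_py; infer_instance

-- ===== CLAIM (what is proved, stated in full; the proofs are below) =====
def Claim_equal_sort_and_trim_py : Prop := ∀ (items : List (List (String × String))) (limit : Int), Dom_sort_and_trim_py items limit → Spec_sort_and_trim_py items limit (sort_and_trim_py items limit)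

-- ===== LEMMAS AND PROOFS =====

theorem aStep_empty (d : PySem.Dict (String × String) (List (String × String)))
    (item : List (String × String)) (h : item.isEmpty) : aStep d item = d := by
  simp [aStep, h]

-- aStep with a key different from k leaves a leading (k, v) entry alone
theorem aStep_cons (k : String × String) (v : List (String × String))
    (l : List ((String × String) × List (String × String))) (item : List (String × String))
    (hne : item.isEmpty = false) (hk : pvKey item ≠ k) :
    aStep ⟨(k, v) :: l⟩ item = ⟨(k, v) :: (aStep ⟨l⟩ item).items⟩ := by
  have hkne : ¬ k = pvKey item := fun h => hk h.symm
  have hbeq : (k == pvKey item) = false := by simp [beq_eq_false_iff_ne, hkne]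
  simp only [aStep, hne, Bool.false_eq_true, if_false]
  simp only [PySem.Dict.get?, List.find?, hbeq]
  cases hfind : (List.find? (fun p => p.1 == pvKey item) l) with
  | none =>
      simp only [Option.map_none]
      simp only [PySem.Dict.insert, PySem.Dict.contains, List.any_cons, hbeq, Bool.false_or]
      cases hany : l.any (fun p => p.1 == pvKey item) <;> simp [hkne]
  | some p =>
      simp only [Option.map_some]
      split
      · simp only [PySem.Dict.insert, PySem.Dict.contains, List.any_cons, hbeq, Bool.false_or]
        cases hany : l.any (fun p => p.1 == pvKey item) <;> simp [hkne]
      · rfl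

-- aStep with key k on a dict whose head is (k, v) and whose tail avoids k updates the head
theorem aStep_hit (k : String × String) (v : List (String × String))
    (l : List ((String × String) × List (String × String))) (item : List (String × String))
    (hne : item.isEmpty = false) (hk : pvKey item = k)
    (hl : ∀ q ∈ l, q.1 ≠ k) :
    aStep ⟨(k, v) :: l⟩ item = ⟨(k, if pvSk v < pvSk item then item else v) :: l⟩ := by
  have hbeq : (k == pvKey item) = true := by simp [hk]
  simp only [aStep, hne, Bool.false_eq_true, if_false]
  simp only [PySem.Dict.get?, List.find?, hbeq, Option.map_some]
  have hmap : List.map (fun p => if p.1 == pvKey item then (pvKey item, item) else p) l = l := by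
    conv_rhs => rw [← List.map_id l]
    apply List.map_congr_left
    intro q hq
    have hq1 : (q.1 == pvKey item) = false := by
      simp [beq_eq_false_iff_ne, hk]; exact hl q hq
    simp [hq1]
  split
  · simp only [PySem.Dict.insert, PySem.Dict.contains, List.any_cons, hbeq, Bool.true_or,
      if_true, List.map_cons, hmap]
    simp [hk]
  · simp

-- keys different from both k stay different from k through aStep
theorem aStep_keys (k : String × String) (l : List ((String × String) × List (String × String)))
    (item : List (String × String)) (hk : pvKey item ≠ k) (hl : ∀ q ∈ l, q.1 ≠ k) :
    ∀ q ∈ (aStep ⟨l⟩ item).items, q.1 ≠ k := by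
  intro q hq
  by_cases hne : item.isEmpty
  · rw [aStep_empty _ _ hne] at hq; exact hl q hq
  · simp only [aStep, hne, Bool.false_eq_true, if_false] at hq
    have hins : ∀ r ∈ (PySem.Dict.insert ⟨l⟩ (pvKey item) item).items, r.1 ≠ k := by
      intro r hr
      simp only [PySem.Dict.insert] at hr
      split at hr
      · simp only [List.mem_map] at hr
        obtain ⟨p, hp, hpr⟩ := hr
        by_cases hpk : (p.1 == pvKey item) = true
        · simp [hpk] at hpr; rw [← hpr]; exact hk
        · simp [hpk] at hpr; rw [← hpr]; exact hl p hp
      · simp only [List.mem_append, List.mem_singleton] at hr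
        rcases hr with hr | hr
        · exact hl r hr
        · rw [hr]; exact hk
    split at hq
    · exact hins q hq
    · split at hq
      · exact hins q hq
      · exact hl q hq

-- the fold over a dict with leading (k, v): the head accumulates the best item of key k,
-- everything else folds over the tail with the k-items filtered out
theorem foldl_aStep_cons (rest : List (List (String × String))) (k : String × String)
    (v : List (String × String)) (l : List ((String × String) × List (String × String)))
    (hl : ∀ q ∈ l, q.1 ≠ k) :
    rest.foldl aStep ⟨(k, v) :: l⟩ =
      ⟨(k, rest.foldl (fun b item =>
            if item.isEmpty = false ∧ pvKey item = k ∧ pvSk b < pvSk item then item else b) v) ::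
        ((rest.filter (fun item => !item.isEmpty && !(pvKey item == k))).foldl aStep ⟨l⟩).items⟩ := by
  induction rest generalizing v l with
  | nil => rfl
  | cons item rest ih =>
      by_cases hne : item.isEmpty
      · have h1 : aStep ⟨(k, v) :: l⟩ item = ⟨(k, v) :: l⟩ := aStep_empty _ _ hne
        simp only [List.foldl_cons, List.filter_cons, hne, Bool.not_true, Bool.false_and,
          Bool.false_eq_true, if_false, h1]
        rw [ih v l hl]
        simp
      · have hne' : item.isEmpty = false := by simpa using hne
        by_cases hk : pvKey item = k
        · have h1 := aStep_hit k v l item hne' hk hl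
          simp only [List.foldl_cons, List.filter_cons, hne', hk, beq_self_eq_true,
            Bool.not_true, Bool.and_false, Bool.false_eq_true, if_false, h1]
          rw [ih _ l hl]
          congr 3
          simp
        · have h1 := aStep_cons k v l item hne' hk
          simp only [List.foldl_cons, h1]
          have hl' := aStep_keys k l item hk hl
          rw [ih v _ hl']
          have hbeq : (pvKey item == k) = false := by simp [beq_eq_false_iff_ne]; exact hk
          simp only [List.filter_cons, hne', hbeq, Bool.not_false, Bool.and_self, if_true,
            List.foldl_cons]
          congr 2
          simp [hk]

theorem dict_values_cons (x : (String × String) × List (String × String))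
    (l : List ((String × String) × List (String × String))) :
    PySem.Dict.values (⟨x :: l⟩ : PySem.Dict (String × String) (List (String × String))) =
      x.2 :: PySem.Dict.values ⟨l⟩ := by
  simp [PySem.Dict.values]

theorem pvDedup_nil : pvDedup [] = [] := by rw [pvDedup]

theorem pvDedup_cons (head : List (String × String)) (tail : List (List (String × String))) :
    pvDedup (head :: tail) =
      (tail.foldl (pvBest (pvKey head)) head) ::
        pvDedup (tail.filter (fun item => !(pvKey item == pvKey head))) := by
  rw [pvDedup]

-- main dedup lemma: A's dict fold produces exactly B's group extraction, in order
theorem foldl_aStep_eq_pvDedup (n : Nat) (items : List (List (String × String)))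
    (hn : items.length ≤ n) :
    (items.foldl aStep ⟨[]⟩).values = pvDedup (items.filter (fun item => !item.isEmpty)) := by
  induction n generalizing items with
  | zero =>
      have : items = [] := List.length_eq_zero_iff.mp (Nat.le_zero.mp hn)
      subst this; simp [pvDedup_nil, PySem.Dict.values]
  | succ n ih =>
      cases items with
      | nil => simp [pvDedup_nil, PySem.Dict.values]
      | cons item rest =>
          by_cases hne : item.isEmpty
          · simp only [List.foldl_cons, aStep_empty _ _ hne, List.filter_cons, hne,
              Bool.not_true, Bool.false_eq_true, if_false]
            exact ih rest (by simpa using Nat.le_of_succ_le_succ (by simpa using hn))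
          · have hne' : item.isEmpty = false := by simpa using hne
            have h0 : aStep ⟨[]⟩ item = ⟨[(pvKey item, item)]⟩ := by
              simp [aStep, hne', PySem.Dict.get?, PySem.Dict.insert, PySem.Dict.contains]
            simp only [List.foldl_cons, h0]
            rw [foldl_aStep_cons rest (pvKey item) item [] (by simp)]
            rw [dict_values_cons]
            simp only [List.filter_cons, hne', Bool.not_false, if_true]
            have hrest : ((rest.filter
                (fun it => !it.isEmpty && !(pvKey it == pvKey item))).foldl aStep
                  (⟨[]⟩ : PySem.Dict (String × String) (List (String × String)))).values =
                pvDedup ((rest.filter (fun it => !it.isEmpty && !(pvKey it == pvKey item))).filter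
                  (fun it => !it.isEmpty)) := by
              apply ih
              calc (rest.filter _).length ≤ rest.length := List.length_filter_le _ _
                _ ≤ n := by simpa using Nat.le_of_succ_le_succ (by simpa using hn)
            rw [hrest]
            rw [pvDedup_cons]
            congr 1
            · -- best of the group: A's guarded fold over rest = B's fold over the truthy items
              have hsplit : ∀ (b it : List (String × String)),
                  (if it.isEmpty = false ∧ pvKey it = pvKey item ∧ pvSk b < pvSk it then it else b)
                    = if it.isEmpty = false then pvBest (pvKey item) b it else b := by
                intro b it
                by_cases h1 : it.isEmpty = false <;> simp [pvBest, h1]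
              calc rest.foldl (fun b it =>
                    if it.isEmpty = false ∧ pvKey it = pvKey item ∧ pvSk b < pvSk it then it else b)
                    item
                  = rest.foldl (fun b it =>
                      if it.isEmpty = false then pvBest (pvKey item) b it else b) item := by
                    exact PySem.List.foldl_congr_mem rest _ _ item (fun b it _ => hsplit b it)
                _ = (rest.filter (fun it => decide (it.isEmpty = false))).foldl
                      (pvBest (pvKey item)) item :=
                    PySem.List.foldl_ite_eq_foldl_filter _ _ _ _
                _ = (rest.filter (fun it => !it.isEmpty)).foldl (pvBest (pvKey item)) item := by
                    congr 1
                    apply List.filter_congr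
                    intro x _
                    cases hx : x.isEmpty <;> simp
            · -- the remainder: the two filter orders coincide
              congr 1
              rw [List.filter_filter, List.filter_filter]
              apply List.filter_congr
              intro x _
              cases hx : x.isEmpty <;> simp [Bool.and_comm]

-- ===== VERDICT (by name: the statement is the Claim_ definition above) =====
theorem sort_and_trim_py_spec : Claim_equal_sort_and_trim_py := by
  intro items limit _
  show sort_and_trim_py items limit = sort_and_trim_py_alt items limit
  simp only [sort_and_trim_py, sort_and_trim_py_alt]
  rw [foldl_aStep_eq_pvDedup items.length items (le_refl _)]
  rw [PySem.List.foldl_append_singleton_eq_map, List.nil_append]
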